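-- pv_equiv track=rewrite | github.com/StarsExpress/LeetCode-Repository | hash/good_subseqs_sum/good_subseqs_sum.py | sum_good_subsequences
-- ===== SOURCE A (Python) =====
-- def sum_good_subsequences(nums: list[int]) -> int:  # LeetCode Q.3351.
--     good_subseqs_sum = 0
--     subsequences_table: dict[int, list[int]] = dict()
--     for num in nums:
--         if num not in subsequences_table.keys():
--             subsequences_table.update(
--                 {num: [0, 0]}  # Format: [count, subseqs sum].
--             )
--         subsequences_table[num][0] += 1
--         subsequences_table[num][1] += num
--         good_subseqs_sum += num
--
--         # Current num extends subseqs at such two ends.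
--         for subseq_end in (num - 1, num + 1):
--             if subseq_end in subsequences_table.keys():
--                 subsequences_table[num][0] += subsequences_table[subseq_end][0]
--
--                 new_sum = subsequences_table[subseq_end][1]
--                 new_sum += subsequences_table[subseq_end][0] * num
--
--                 subsequences_table[num][1] += new_sum
--                 good_subseqs_sum += new_sum
--
--     return good_subseqs_sum % (10 ** 9 + 7)  # Required to control size.
-- ===== SOURCE B (Python) =====
-- def _chain_counts(seq):
--     # counts[i] = number of good subsequences of seq ending at index i.
--     cnt = {}
--     counts = []
--     for num in seq:
--         c = 1 + cnt.get(num - 1, 0) + cnt.get(num + 1, 0)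
--         counts.append(c)
--         cnt[num] = cnt.get(num, 0) + c
--     return counts
--
--
-- def sum_good_subsequences(nums: list[int]) -> int:
--     # Contribution counting: each occurrence nums[i] appears in exactly
--     # ends[i] * starts[i] good subsequences (chains through i split uniquely
--     # into a chain ending at i and a chain starting at i), so the total sum
--     # is sum(nums[i] * ends[i] * starts[i]).
--     ends = _chain_counts(nums)
--     starts = _chain_counts(nums[::-1])[::-1]
--     return sum(x * e * s for x, e, s in zip(nums, ends, starts)) % (10 ** 9 + 7)
-- ===== Notes on version B (the rewrite author's own statement) =====
-- stated objective: alternative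
-- what changed: B abandons A's single-pass count+sum DP with a running accumulator and instead uses contribution counting: two pure counting passes (one forward, one over the reversed list) compute for every index the number of good subsequences ending there and starting there, and the answer is the dot product sum(nums[i]*ends[i]*starts[i]) mod 1e9+7; no per-value subsequence-sum is ever maintained.
import Mathlib
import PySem

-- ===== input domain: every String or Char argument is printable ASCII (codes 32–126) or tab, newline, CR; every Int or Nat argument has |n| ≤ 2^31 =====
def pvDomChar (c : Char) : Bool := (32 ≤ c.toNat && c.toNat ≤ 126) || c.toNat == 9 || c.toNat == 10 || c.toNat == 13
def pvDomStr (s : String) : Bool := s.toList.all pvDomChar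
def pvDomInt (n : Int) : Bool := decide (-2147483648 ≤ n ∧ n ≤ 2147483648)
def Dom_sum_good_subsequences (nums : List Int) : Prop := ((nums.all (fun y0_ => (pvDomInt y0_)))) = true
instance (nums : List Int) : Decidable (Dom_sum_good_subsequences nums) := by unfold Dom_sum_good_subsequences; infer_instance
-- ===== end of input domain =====

-- B replaces A's count+sum DP with contribution counting: two counting passes
-- (forward and over the reversed list) and a final dot product (alternative algorithm, same cost).

-- ===== PORT A =====
-- A's dict value is a mutable 2-list [count, sum]; ported as the pair (count, sum),
-- with each in-place element update ported as an insert of the updated pair.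
def sgsStepA (st : Int × PySem.Dict Int (Int × Int)) (num : Int) :
    Int × PySem.Dict Int (Int × Int) :=
  let tbl0 := if st.2.contains num then st.2 else st.2.insert num (0, 0)
  let e0 := tbl0.getD num (0, 0)
  let tbl1 := tbl0.insert num (e0.1 + 1, e0.2 + num)
  let g1 := st.1 + num
  [num - 1, num + 1].foldl
    (fun acc subseq_end =>
      if acc.2.contains subseq_end then
        let f := acc.2.getD subseq_end (0, 0)
        let e := acc.2.getD num (0, 0)
        let new_sum := f.2 + f.1 * num
        (acc.1 + new_sum, acc.2.insert num (e.1 + f.1, e.2 + new_sum))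
      else acc)
    (g1, tbl1)

def sum_good_subsequences (nums : List Int) : Int :=
  PySem.Int.mod (nums.foldl sgsStepA (0, PySem.Dict.empty)).1 (10 ^ 9 + 7)

-- ===== PORT B =====
-- _chain_counts: cnt.get(x, 0) is Dict.getD; counts.append is ++ [c].
def chainStep (st : List Int × PySem.Dict Int Int) (num : Int) :
    List Int × PySem.Dict Int Int :=
  let c := 1 + st.2.getD (num - 1) 0 + st.2.getD (num + 1) 0
  (st.1 ++ [c], st.2.insert num (st.2.getD num 0 + c))

def chainCounts (seq : List Int) : List Int :=
  (seq.foldl chainStep ([], PySem.Dict.empty)).1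

-- nums[::-1] is List.reverse (exact: PySem.List.slice?_none_none_neg_one).
def sum_good_subsequences_alt (nums : List Int) : Int :=
  PySem.Int.mod
    ((nums.zip ((chainCounts nums).zip ((chainCounts nums.reverse).reverse))).map
      (fun p => p.1 * p.2.1 * p.2.2)).sum (10 ^ 9 + 7)

-- ===== PRECONDITION & SPEC =====
def Spec_sum_good_subsequences (nums : List Int) (out : Int) : Prop := out = sum_good_subsequences_alt nums
instance (nums : List Int) (out : Int) : Decidable (Spec_sum_good_subsequences nums out) := by unfold Spec_sum_good_subsequences; infer_instance

-- ===== CLAIM (what is proved, stated in full; the proofs are below) =====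
def Claim_equal_sum_good_subsequences : Prop := ∀ (nums : List Int), Dom_sum_good_subsequences nums → Spec_sum_good_subsequences nums (sum_good_subsequences nums)

-- ===== LEMMAS AND PROOFS =====

-- value at index i (0 past the end; only indices < length are ever used)
def pvV (nums : List Int) (i : ℕ) : Int := nums.getD i 0

-- adjacency indicator: 1 when the two values differ by exactly 1
def pvW (nums : List Int) (j k : ℕ) : Int :=
  if pvV nums k = pvV nums j - 1 ∨ pvV nums k = pvV nums j + 1 then 1 else 0

-- E j = number of good subsequences ending at index j
def pvE (nums : List Int) : ℕ → Int
  | j => 1 + ∑ k ∈ (Finset.range j).attach, pvW nums j k.1 * pvE nums k.1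
termination_by j => j
decreasing_by exact Finset.mem_range.mp k.2

-- T j = total sum of the good subsequences ending at index j
def pvT (nums : List Int) : ℕ → Int
  | j => pvV nums j * pvE nums j + ∑ k ∈ (Finset.range j).attach, pvW nums j k.1 * pvT nums k.1
termination_by j => j
decreasing_by exact Finset.mem_range.mp k.2

-- S i = number of good subsequences starting at index i
def pvS (nums : List Int) (i : ℕ) : Int :=
  1 + ∑ k ∈ (Finset.Ico (i + 1) nums.length).attach, pvW nums i k.1 * pvS nums k.1
termination_by nums.length - i
decreasing_by
  have h := Finset.mem_Ico.mp k.2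
  omega

lemma pvE_eq (nums : List Int) (j : ℕ) :
    pvE nums j = 1 + ∑ k ∈ Finset.range j, pvW nums j k * pvE nums k := by
  rw [pvE]
  congr 1
  exact Finset.sum_attach (Finset.range j) (fun k => pvW nums j k * pvE nums k)

lemma pvT_eq (nums : List Int) (j : ℕ) :
    pvT nums j = pvV nums j * pvE nums j + ∑ k ∈ Finset.range j, pvW nums j k * pvT nums k := by
  rw [pvT]
  congr 1
  exact Finset.sum_attach (Finset.range j) (fun k => pvW nums j k * pvT nums k)

lemma pvS_eq (nums : List Int) (i : ℕ) :
    pvS nums i = 1 + ∑ k ∈ Finset.Ico (i + 1) nums.length, pvW nums i k * pvS nums k := by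
  rw [pvS]
  congr 1
  exact Finset.sum_attach (Finset.Ico (i + 1) nums.length) (fun k => pvW nums i k * pvS nums k)

lemma pvW_symm (nums : List Int) (j k : ℕ) : pvW nums j k = pvW nums k j := by
  unfold pvW
  split_ifs with h1 h2 h2 <;> first | rfl | omega

-- splitting Σ W(t,k)·f(k) into the two neighbour values
lemma sum_W_split (nums : List Int) (t : ℕ) (f : ℕ → Int) :
    ∑ k ∈ Finset.range t, pvW nums t k * f k
      = (∑ k ∈ Finset.range t, if pvV nums k = pvV nums t - 1 then f k else 0)
      + (∑ k ∈ Finset.range t, if pvV nums k = pvV nums t + 1 then f k else 0) := by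
  rw [← Finset.sum_add_distrib]
  refine Finset.sum_congr rfl (fun k _ => ?_)
  unfold pvW
  by_cases h2 : pvV nums k = pvV nums t - 1
  · have h3 : ¬ pvV nums k = pvV nums t + 1 := by omega
    rw [if_pos (Or.inl h2), if_pos h2, if_neg h3]; ring
  · by_cases h3 : pvV nums k = pvV nums t + 1
    · rw [if_pos (Or.inr h3), if_neg h2, if_pos h3]; ring
    · rw [if_neg (by tauto), if_neg h2, if_neg h3]; ring

-- triangle double-sum swap
lemma sum_Ico_swap (f : ℕ → ℕ → Int) (n : ℕ) :
    ∑ j ∈ Finset.range n, ∑ k ∈ Finset.Ico (j + 1) n, f j k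
      = ∑ k ∈ Finset.range n, ∑ j ∈ Finset.range k, f j k := by
  induction n with
  | zero => simp
  | succ n ih =>
    rw [Finset.sum_range_succ, Finset.sum_range_succ]
    have h1 : ∀ j ∈ Finset.range n, ∑ k ∈ Finset.Ico (j + 1) (n + 1), f j k
        = (∑ k ∈ Finset.Ico (j + 1) n, f j k) + f j n := by
      intro j hj
      exact Finset.sum_Ico_succ_top (by have := Finset.mem_range.mp hj; omega) _
    rw [Finset.sum_congr rfl h1, Finset.sum_add_distrib, ih]
    simp

-- the core identity: Σ T = Σ v·E·S  (summation by parts)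
lemma pvCore (nums : List Int) :
    ∑ j ∈ Finset.range nums.length, pvT nums j
      = ∑ j ∈ Finset.range nums.length, pvV nums j * pvE nums j * pvS nums j := by
  calc ∑ j ∈ Finset.range nums.length, pvT nums j
      = ∑ j ∈ Finset.range nums.length,
          (pvT nums j * pvS nums j
            - ∑ k ∈ Finset.Ico (j + 1) nums.length, pvW nums j k * pvT nums j * pvS nums k) := by
        refine Finset.sum_congr rfl (fun j _ => ?_)
        rw [pvS_eq nums j, mul_add, mul_one, Finset.mul_sum]
        have h2 : ∑ k ∈ Finset.Ico (j + 1) nums.length, pvT nums j * (pvW nums j k * pvS nums k)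
            = ∑ k ∈ Finset.Ico (j + 1) nums.length, pvW nums j k * pvT nums j * pvS nums k :=
          Finset.sum_congr rfl (fun k _ => by ring)
        rw [h2]
        ring
    _ = (∑ j ∈ Finset.range nums.length, pvT nums j * pvS nums j)
          - ∑ j ∈ Finset.range nums.length, ∑ k ∈ Finset.Ico (j + 1) nums.length,
              pvW nums j k * pvT nums j * pvS nums k := by rw [Finset.sum_sub_distrib]
    _ = (∑ j ∈ Finset.range nums.length, pvT nums j * pvS nums j)
          - ∑ k ∈ Finset.range nums.length, pvS nums k * (pvT nums k - pvV nums k * pvE nums k) := by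
        rw [sum_Ico_swap (fun j k => pvW nums j k * pvT nums j * pvS nums k) nums.length]
        congr 1
        refine Finset.sum_congr rfl (fun k _ => ?_)
        have hT : ∑ j ∈ Finset.range k, pvW nums k j * pvT nums j
            = pvT nums k - pvV nums k * pvE nums k := by
          rw [pvT_eq nums k]; ring
        calc ∑ j ∈ Finset.range k, pvW nums j k * pvT nums j * pvS nums k
            = pvS nums k * ∑ j ∈ Finset.range k, pvW nums k j * pvT nums j := by
              rw [Finset.mul_sum]
              refine Finset.sum_congr rfl (fun j _ => ?_)
              rw [pvW_symm nums j k]; ring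
          _ = pvS nums k * (pvT nums k - pvV nums k * pvE nums k) := by rw [hT]
    _ = ∑ j ∈ Finset.range nums.length, pvV nums j * pvE nums j * pvS nums j := by
        rw [← Finset.sum_sub_distrib]
        refine Finset.sum_congr rfl (fun j _ => ?_)
        ring

-- ---------- A side ----------

def pvSC (nums : List Int) (t : ℕ) (x : Int) : Int :=
  ∑ i ∈ Finset.range t, if pvV nums i = x then pvE nums i else 0
def pvST (nums : List Int) (t : ℕ) (x : Int) : Int :=
  ∑ i ∈ Finset.range t, if pvV nums i = x then pvT nums i else 0

def InvA (nums : List Int) (t : ℕ) (d : PySem.Dict Int (Int × Int)) : Prop :=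
  (∀ x : Int, d.getD x (0, 0) = (pvSC nums t x, pvST nums t x)) ∧
  (∀ x : Int, d.contains x = true ↔ ∃ i ∈ Finset.range t, pvV nums i = x)

-- normal form of one A step
lemma sgsStepA_run (g : Int) (d : PySem.Dict Int (Int × Int)) (num : Int) :
    sgsStepA (g, d) num =
      ((g + num
          + ((if d.contains (num - 1) then d.getD (num - 1) (0, 0) else (0, 0)).2
              + (if d.contains (num - 1) then d.getD (num - 1) (0, 0) else (0, 0)).1 * num)
          + ((if d.contains (num + 1) then d.getD (num + 1) (0, 0) else (0, 0)).2
              + (if d.contains (num + 1) then d.getD (num + 1) (0, 0) else (0, 0)).1 * num)),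
       d.insert num
         ((d.getD num (0, 0)).1 + 1
            + (if d.contains (num - 1) then d.getD (num - 1) (0, 0) else (0, 0)).1
            + (if d.contains (num + 1) then d.getD (num + 1) (0, 0) else (0, 0)).1,
          (d.getD num (0, 0)).2 + num
            + ((if d.contains (num - 1) then d.getD (num - 1) (0, 0) else (0, 0)).2
                + (if d.contains (num - 1) then d.getD (num - 1) (0, 0) else (0, 0)).1 * num)
            + ((if d.contains (num + 1) then d.getD (num + 1) (0, 0) else (0, 0)).2
                + (if d.contains (num + 1) then d.getD (num + 1) (0, 0) else (0, 0)).1 * num))) := by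
  have hb1 : ((num - 1 : Int) == num) = false := by rw [beq_eq_false_iff_ne]; omega
  have hb2 : ((num + 1 : Int) == num) = false := by rw [beq_eq_false_iff_ne]; omega
  have c1 : ∀ (d' : PySem.Dict Int (Int × Int)) (v : Int × Int),
      (d'.insert num v).contains (num - 1) = d'.contains (num - 1) := by
    intro d' v
    rw [PySem.Dict.contains_insert, hb1, Bool.false_or]
  have c2 : ∀ (d' : PySem.Dict Int (Int × Int)) (v : Int × Int),
      (d'.insert num v).contains (num + 1) = d'.contains (num + 1) := by
    intro d' v
    rw [PySem.Dict.contains_insert, hb2, Bool.false_or]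
  have e1 : ∀ (d' : PySem.Dict Int (Int × Int)) (v : Int × Int),
      (d'.insert num v).getD (num - 1) (0, 0) = d'.getD (num - 1) (0, 0) :=
    fun d' v => PySem.Dict.getD_insert_of_ne d' v (0, 0) (by omega)
  have e2 : ∀ (d' : PySem.Dict Int (Int × Int)) (v : Int × Int),
      (d'.insert num v).getD (num + 1) (0, 0) = d'.getD (num + 1) (0, 0) :=
    fun d' v => PySem.Dict.getD_insert_of_ne d' v (0, 0) (by omega)
  cases hn : d.contains num with
  | true =>
    cases hm : d.contains (num - 1) <;> cases hp : d.contains (num + 1) <;>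
    · simp only [sgsStepA, List.foldl, hn, hm, hp, c1, c2, e1, e2,
        PySem.Dict.insert_insert_self, PySem.Dict.getD_insert_self,
        Bool.false_eq_true, if_true, if_false]
      try
        refine Prod.ext (by dsimp only; ring) ?_
        dsimp only
        first
        | rfl
        | (congr 1
           refine Prod.ext ?_ ?_ <;> dsimp only <;> ring)
  | false =>
    have h0 : d.getD num (0, 0) = (0, 0) := PySem.Dict.getD_of_not_contains d _ hn
    cases hm : d.contains (num - 1) <;> cases hp : d.contains (num + 1) <;>
    · simp only [sgsStepA, List.foldl, hn, hm, hp, c1, c2, e1, e2, h0,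
        PySem.Dict.insert_insert_self, PySem.Dict.getD_insert_self,
        Bool.false_eq_true, if_true, if_false]
      try
        refine Prod.ext (by dsimp only; ring) ?_
        dsimp only
        first
        | rfl
        | (congr 1
           refine Prod.ext ?_ ?_ <;> dsimp only <;> ring)

lemma A_step (nums : List Int) (t : ℕ) (g : Int) (d : PySem.Dict Int (Int × Int))
    (hI : InvA nums t d) :
    (sgsStepA (g, d) (pvV nums t)).1 = g + pvT nums t ∧
      InvA nums (t + 1) (sgsStepA (g, d) (pvV nums t)).2 := by
  obtain ⟨hC, hK⟩ := hI
  have hzero : ∀ x : Int, d.contains x = false → pvSC nums t x = 0 ∧ pvST nums t x = 0 := by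
    intro x hx
    have hnx : ∀ i ∈ Finset.range t, ¬ pvV nums i = x := by
      intro i hi hv
      have := (hK x).mpr ⟨i, hi, hv⟩
      rw [hx] at this
      exact Bool.false_ne_true this
    exact ⟨Finset.sum_eq_zero (fun i hi => if_neg (hnx i hi)),
           Finset.sum_eq_zero (fun i hi => if_neg (hnx i hi))⟩
  have hfm : (if d.contains (pvV nums t - 1) then d.getD (pvV nums t - 1) (0, 0) else ((0 : Int), (0 : Int)))
      = (pvSC nums t (pvV nums t - 1), pvST nums t (pvV nums t - 1)) := by
    cases h : d.contains (pvV nums t - 1)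
    · obtain ⟨h1, h2⟩ := hzero _ h
      simp [h1, h2]
    · simp [hC]
  have hfp : (if d.contains (pvV nums t + 1) then d.getD (pvV nums t + 1) (0, 0) else ((0 : Int), (0 : Int)))
      = (pvSC nums t (pvV nums t + 1), pvST nums t (pvV nums t + 1)) := by
    cases h : d.contains (pvV nums t + 1)
    · obtain ⟨h1, h2⟩ := hzero _ h
      simp [h1, h2]
    · simp [hC]
  have hE : pvE nums t = 1 + pvSC nums t (pvV nums t - 1) + pvSC nums t (pvV nums t + 1) := by
    rw [pvE_eq, sum_W_split]
    unfold pvSC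
    ring
  have hTt : pvT nums t = pvV nums t * pvE nums t
      + (pvST nums t (pvV nums t - 1) + pvST nums t (pvV nums t + 1)) := by
    rw [pvT_eq, sum_W_split]
    unfold pvST
    ring
  rw [sgsStepA_run g d (pvV nums t), hfm, hfp, hC (pvV nums t)]
  dsimp only
  constructor
  · rw [hTt, hE]; ring
  · constructor
    · intro x
      by_cases hx : x = pvV nums t
      · subst hx
        rw [PySem.Dict.getD_insert_self]
        unfold pvSC pvST
        rw [Finset.sum_range_succ, Finset.sum_range_succ, if_pos rfl, if_pos rfl]
        refine Prod.ext ?_ ?_ <;> dsimp only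
        · rw [hE]; unfold pvSC; ring
        · rw [hTt, hE]; unfold pvSC pvST; ring
      · rw [PySem.Dict.getD_insert_of_ne d _ (0, 0) hx, hC x]
        unfold pvSC pvST
        rw [Finset.sum_range_succ, Finset.sum_range_succ,
            if_neg (fun h => hx h.symm), if_neg (fun h => hx h.symm)]
        simp
    · intro x
      rw [PySem.Dict.contains_insert]
      simp only [Bool.or_eq_true, beq_iff_eq, hK x, Finset.mem_range]
      constructor
      · rintro (h | ⟨i, hi, hv⟩)
        · exact ⟨t, by omega, h.symm⟩
        · exact ⟨i, by omega, hv⟩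
      · rintro ⟨i, hi, hv⟩
        by_cases hit : i = t
        · subst hit; exact Or.inl hv.symm
        · exact Or.inr ⟨i, by omega, hv⟩

lemma A_fold (nums : List Int) : ∀ t, t ≤ nums.length →
    ((nums.take t).foldl sgsStepA (0, PySem.Dict.empty)).1 = (∑ j ∈ Finset.range t, pvT nums j) ∧
      InvA nums t ((nums.take t).foldl sgsStepA (0, PySem.Dict.empty)).2 := by
  intro t
  induction t with
  | zero =>
    intro _
    refine ⟨by simp, ?_, ?_⟩
    · intro x
      unfold pvSC pvST
      simp [PySem.Dict.empty, PySem.Dict.getD, PySem.Dict.get?]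
    · intro x
      simp [PySem.Dict.empty, PySem.Dict.contains]
  | succ t ih =>
    intro ht
    have htl : t < nums.length := ht
    obtain ⟨ihg, ihI⟩ := ih (Nat.le_of_lt htl)
    have htake : nums.take (t + 1) = nums.take t ++ [pvV nums t] := by
      rw [List.take_add_one, List.getElem?_eq_getElem htl]
      have : nums[t] = pvV nums t := (List.getD_eq_getElem nums 0 htl).symm
      rw [this]
      rfl
    rw [htake, List.foldl_append, List.foldl_cons, List.foldl_nil]
    obtain ⟨h1, h2⟩ := A_step nums t ((nums.take t).foldl sgsStepA (0, PySem.Dict.empty)).1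
      ((nums.take t).foldl sgsStepA (0, PySem.Dict.empty)).2 ihI
    refine ⟨?_, h2⟩
    rw [h1, ihg, Finset.sum_range_succ]

-- ---------- B side ----------

def pvC (seq : List Int) (t : ℕ) (x : Int) : Int :=
  ∑ i ∈ Finset.range t, if pvV seq i = x then pvE seq i else 0

lemma B_fold (seq : List Int) : ∀ t, t ≤ seq.length →
    ((seq.take t).foldl chainStep ([], PySem.Dict.empty)).1 = (List.range t).map (pvE seq) ∧
      ∀ x : Int, ((seq.take t).foldl chainStep ([], PySem.Dict.empty)).2.getD x 0 = pvC seq t x := by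
  intro t
  induction t with
  | zero =>
    intro _
    refine ⟨by simp, ?_⟩
    intro x
    unfold pvC
    simp [PySem.Dict.empty, PySem.Dict.getD, PySem.Dict.get?]
  | succ t ih =>
    intro ht
    have htl : t < seq.length := ht
    obtain ⟨ihl, ihd⟩ := ih (Nat.le_of_lt htl)
    have htake : seq.take (t + 1) = seq.take t ++ [pvV seq t] := by
      rw [List.take_add_one, List.getElem?_eq_getElem htl]
      have : seq[t] = pvV seq t := (List.getD_eq_getElem seq 0 htl).symm
      rw [this]
      rfl
    rw [htake, List.foldl_append, List.foldl_cons, List.foldl_nil]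
    have hc : 1 + ((seq.take t).foldl chainStep ([], PySem.Dict.empty)).2.getD (pvV seq t - 1) 0
        + ((seq.take t).foldl chainStep ([], PySem.Dict.empty)).2.getD (pvV seq t + 1) 0
        = pvE seq t := by
      rw [ihd, ihd, pvE_eq, sum_W_split]
      unfold pvC
      ring
    constructor
    · show ((seq.take t).foldl chainStep ([], PySem.Dict.empty)).1 ++ [_] = _
      rw [ihl, hc, List.range_succ, List.map_append, List.map_cons, List.map_nil]
    · intro x
      show (((seq.take t).foldl chainStep ([], PySem.Dict.empty)).2.insert (pvV seq t) _).getD x 0 = _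
      by_cases hx : x = pvV seq t
      · subst hx
        rw [PySem.Dict.getD_insert_self, ihd, hc]
        unfold pvC
        rw [Finset.sum_range_succ, if_pos rfl]
      · rw [PySem.Dict.getD_insert_of_ne _ _ 0 hx, ihd]
        unfold pvC
        rw [Finset.sum_range_succ, if_neg (fun h => hx h.symm), add_zero]

lemma chainCounts_eq (seq : List Int) :
    chainCounts seq = (List.range seq.length).map (pvE seq) := by
  have h := (B_fold seq seq.length le_rfl).1
  rw [List.take_length] at h
  exact h

lemma pvV_reverse (nums : List Int) (i : ℕ) (hi : i < nums.length) :
    pvV nums.reverse i = pvV nums (nums.length - 1 - i) := by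
  unfold pvV
  rw [List.getD_eq_getElem nums.reverse 0 (by simpa using hi),
      List.getD_eq_getElem nums 0 (by omega)]
  simp [List.getElem_reverse]

lemma pvW_reverse (nums : List Int) (i k : ℕ) (hi : i < nums.length) (hk : k < nums.length) :
    pvW nums.reverse i k = pvW nums (nums.length - 1 - i) (nums.length - 1 - k) := by
  unfold pvW
  rw [pvV_reverse nums i hi, pvV_reverse nums k hk]

lemma sum_range_reflect_Ico (F : ℕ → Int) (n : ℕ) :
    ∀ i, i ≤ n → ∑ k ∈ Finset.range i, F (n - 1 - k) = ∑ k ∈ Finset.Ico (n - i) n, F k := by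
  intro i
  induction i with
  | zero => simp
  | succ i ih =>
    intro h
    rw [Finset.sum_range_succ, ih (by omega),
        Finset.sum_eq_sum_Ico_succ_bot (show n - (i + 1) < n by omega) F]
    have h1 : n - (i + 1) + 1 = n - i := by omega
    have h2 : n - 1 - i = n - (i + 1) := by omega
    rw [h1, h2]
    ring

lemma E_rev_eq_S (nums : List Int) : ∀ i, i < nums.length →
    pvE nums.reverse i = pvS nums (nums.length - 1 - i) := by
  intro i
  induction i using Nat.strong_induction_on with
  | _ i IH =>
    intro hi
    rw [pvE_eq, pvS_eq]
    have hsum : ∑ k ∈ Finset.range i, pvW nums.reverse i k * pvE nums.reverse k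
        = ∑ k ∈ Finset.range i,
            pvW nums (nums.length - 1 - i) (nums.length - 1 - k) * pvS nums (nums.length - 1 - k) := by
      refine Finset.sum_congr rfl (fun k hk => ?_)
      have hki : k < i := Finset.mem_range.mp hk
      rw [pvW_reverse nums i k hi (by omega), IH k hki (by omega)]
    rw [hsum,
        sum_range_reflect_Ico (fun m => pvW nums (nums.length - 1 - i) m * pvS nums m)
          nums.length i (by omega)]
    have hIco : nums.length - 1 - i + 1 = nums.length - i := by omega
    rw [hIco]

lemma starts_eq (nums : List Int) :
    (chainCounts nums.reverse).reverse = (List.range nums.length).map (pvS nums) := by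
  rw [chainCounts_eq nums.reverse]
  apply List.ext_getElem
  · simp
  · intro j h1 h2
    simp only [List.length_reverse, List.length_map, List.length_range] at h1 h2
    have hj : j < nums.length := by simpa using h2
    rw [List.getElem_reverse, List.getElem_map, List.getElem_map]
    simp only [List.getElem_range, List.length_map, List.length_range, List.length_reverse]
    have hlt : nums.length - 1 - j < nums.length := by omega
    rw [E_rev_eq_S nums (nums.length - 1 - j) hlt]
    congr 1
    omega

lemma B_value (nums : List Int) :
    ((nums.zip ((chainCounts nums).zip ((chainCounts nums.reverse).reverse))).map
        (fun p => p.1 * p.2.1 * p.2.2)).sum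
      = ∑ j ∈ Finset.range nums.length, pvV nums j * pvE nums j * pvS nums j := by
  rw [chainCounts_eq nums, starts_eq nums, List.zip_map']
  have hz : nums.zip ((List.range nums.length).map (fun a => (pvE nums a, pvS nums a)))
      = (List.range nums.length).map (fun i => (pvV nums i, (pvE nums i, pvS nums i))) := by
    apply List.ext_getElem
    · simp
    · intro i h1 h2
      have hi : i < nums.length := by simpa using h2
      rw [List.getElem_zip, List.getElem_map, List.getElem_map, List.getElem_range]
      unfold pvV
      simp [List.getElem?_eq_getElem hi]
  rw [hz, List.map_map]
  rfl

-- ===== VERDICT (by name: the statement is the Claim_ definition above) =====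
theorem sum_good_subsequences_spec : Claim_equal_sum_good_subsequences := by
  intro nums _
  unfold Spec_sum_good_subsequences sum_good_subsequences sum_good_subsequences_alt
  have hA := (A_fold nums nums.length le_rfl).1
  rw [List.take_length] at hA
  rw [hA, B_value nums, pvCore nums]
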